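-- pv_equiv track=rewrite | github.com/kaushalkahapola/retrofit-java | agents-backend/src/agents/structural_locator.py | _find_line_in_target
-- ===== SOURCE A (Python) =====
-- def _find_line_in_target(target_lines: list[str], needle: str) -> int | None:
--     """Find first matching line (exact/trimmed/substring) and return 1-based index."""
--     if not target_lines or not needle:
--         return None
--
--     stripped = needle.strip()
--     if not stripped:
--         return None
--
--     # Pass 1: exact line match
--     for idx, line in enumerate(target_lines, start=1):
--         if line == needle:
--             return idx
--
--     # Pass 2: trimmed exact match
--     for idx, line in enumerate(target_lines, start=1):
--         if line.strip() == stripped: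
--             return idx
--
--     # Pass 3: substring fallback for short/partial snippets
--     for idx, line in enumerate(target_lines, start=1):
--         if stripped in line:
--             return idx
--
--     return None
-- ===== SOURCE B (Python) =====
-- def _find_line_in_target(target_lines: list[str], needle: str) -> int | None:
--     """Single pass with three candidate accumulators (exact > trimmed > substring)."""
--     if not target_lines or not needle:
--         return None
--
--     stripped = needle.strip()
--     if not stripped:
--         return None
--
--     exact_idx = None
--     trimmed_idx = None
--     substr_idx = None
--     for idx, line in enumerate(target_lines, start=1):
--         if exact_idx is None and line == needle:
--             exact_idx = idx
--         if trimmed_idx is None and line.strip() == stripped: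
--             trimmed_idx = idx
--         if substr_idx is None and stripped in line:
--             substr_idx = idx
--
--     if exact_idx is not None:
--         return exact_idx
--     if trimmed_idx is not None:
--         return trimmed_idx
--     return substr_idx
-- ===== Notes on version B (the rewrite author's own statement) =====
-- stated objective: alternative
-- what changed: Replaced A's three sequential full scans with early returns by one single traversal maintaining three initially-None candidate indices (exact/trimmed/substring), resolved by priority after the loop.
import Mathlib
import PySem

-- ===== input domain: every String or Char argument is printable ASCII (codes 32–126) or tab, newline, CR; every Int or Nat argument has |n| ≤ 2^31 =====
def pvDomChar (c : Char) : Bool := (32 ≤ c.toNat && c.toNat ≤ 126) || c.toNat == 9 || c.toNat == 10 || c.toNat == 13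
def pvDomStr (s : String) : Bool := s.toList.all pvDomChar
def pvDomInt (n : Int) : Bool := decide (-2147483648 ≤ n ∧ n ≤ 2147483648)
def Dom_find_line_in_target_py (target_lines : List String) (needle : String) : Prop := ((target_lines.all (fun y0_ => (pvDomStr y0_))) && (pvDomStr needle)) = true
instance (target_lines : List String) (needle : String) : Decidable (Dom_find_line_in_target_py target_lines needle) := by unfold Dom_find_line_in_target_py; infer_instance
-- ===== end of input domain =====

-- B replaces A's three sequential scans (each with an early return) by one single pass
-- keeping three candidate indices; objective: alternative decomposition, same cost.

-- ===== PORT A =====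
-- Pass 1: exact line match (for idx, line in enumerate(target_lines, 1): if line == needle: return idx)
def pvPass1 (needle : String) : List String → Int → Option Int
  | [], _ => none
  | line :: rest, idx => if line == needle then some idx else pvPass1 needle rest (idx + 1)

-- Pass 2: trimmed exact match
def pvPass2 (stripped : String) : List String → Int → Option Int
  | [], _ => none
  | line :: rest, idx => if PySem.Str.strip line == stripped then some idx else pvPass2 stripped rest (idx + 1)

-- Pass 3: substring fallback
def pvPass3 (stripped : String) : List String → Int → Option Int
  | [], _ => none
  | line :: rest, idx => if PySem.Str.isIn stripped line then some idx else pvPass3 stripped rest (idx + 1)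

def find_line_in_target_py (target_lines : List String) (needle : String) : Option Int :=
  if target_lines.isEmpty || needle == "" then none
  else
    let stripped := PySem.Str.strip needle
    if stripped == "" then none
    else
      match pvPass1 needle target_lines 1 with
      | some idx => some idx
      | none =>
        match pvPass2 stripped target_lines 1 with
        | some idx => some idx
        | none => pvPass3 stripped target_lines 1

-- ===== PORT B =====
-- single pass over enumerate(target_lines, 1) with three accumulators
def pvScanB (needle stripped : String) : List String → Int → Option Int × Option Int × Option Int → Option Int × Option Int × Option Int
  | [], _, st => st
  | line :: rest, idx, (e, t, s) =>
    pvScanB needle stripped rest (idx + 1)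
      ((if e.isNone && line == needle then some idx else e),
       (if t.isNone && PySem.Str.strip line == stripped then some idx else t),
       (if s.isNone && PySem.Str.isIn stripped line then some idx else s))

def find_line_in_target_py_alt (target_lines : List String) (needle : String) : Option Int :=
  if target_lines.isEmpty || needle == "" then none
  else
    let stripped := PySem.Str.strip needle
    if stripped == "" then none
    else
      match pvScanB needle stripped target_lines 1 (none, none, none) with
      | (some i, _, _) => some i
      | (none, some i, _) => some i
      | (none, none, s) => s

-- ===== PRECONDITION & SPEC =====
def Spec_find_line_in_target_py (target_lines : List String) (needle : String) (out : Option Int) : Prop := out = find_line_in_target_py_alt target_lines needle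
instance (target_lines : List String) (needle : String) (out : Option Int) : Decidable (Spec_find_line_in_target_py target_lines needle out) := by unfold Spec_find_line_in_target_py; infer_instance

-- ===== CLAIM (what is proved, stated in full; the proofs are below) =====
def Claim_equal_find_line_in_target_py : Prop := ∀ (target_lines : List String) (needle : String), Dom_find_line_in_target_py target_lines needle → Spec_find_line_in_target_py target_lines needle (find_line_in_target_py target_lines needle)

-- ===== LEMMAS AND PROOFS =====
-- each accumulator of the scan ends as its initial value if set, else as the first match
-- of the corresponding pass over the remaining lines
lemma pvScanB_eq (needle stripped : String) (ls : List String) (idx : Int)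
    (e t s : Option Int) :
    pvScanB needle stripped ls idx (e, t, s) =
      (e.or (pvPass1 needle ls idx), t.or (pvPass2 stripped ls idx), s.or (pvPass3 stripped ls idx)) := by
  induction ls generalizing idx e t s with
  | nil => cases e <;> cases t <;> cases s <;> simp [pvScanB, Option.or, pvPass1, pvPass2, pvPass3]
  | cons line rest ih =>
    simp only [pvScanB, ih]
    cases e <;> cases t <;> cases s <;>
      simp [pvPass1, pvPass2, pvPass3, Option.or] <;> split_ifs <;> simp

theorem find_line_in_target_py_spec_aux (target_lines : List String) (needle : String) :
    find_line_in_target_py target_lines needle = find_line_in_target_py_alt target_lines needle := by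
  unfold find_line_in_target_py find_line_in_target_py_alt
  by_cases h1 : (target_lines.isEmpty || needle == "") = true
  · simp [h1]
  · by_cases h2 : (PySem.Str.strip needle == "") = true
    · simp [h1, h2]
    · simp only [h1, h2, if_false, Bool.false_eq_true]
      rw [pvScanB_eq]
      cases pvPass1 needle target_lines 1 <;>
        cases pvPass2 (PySem.Str.strip needle) target_lines 1 <;>
        simp [Option.or]

-- ===== VERDICT (by name: the statement is the Claim_ definition above) =====
theorem find_line_in_target_py_spec : Claim_equal_find_line_in_target_py := by
  intro target_lines needle _
  exact find_line_in_target_py_spec_aux target_lines needle
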